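-- pv_equiv track=rewrite | github.com/canidlogic/langtag | util/iso2.py | check_code_2
-- ===== SOURCE A (Python) =====
-- def check_code_2(cd):
--   if not isinstance(cd, str):
--     return False
--   if len(cd) != 2:
--     return False
--   for c in cd:
--     if (ord(c) < ord('a')) or (ord(c) > ord('z')):
--       return False
--   return True
-- ===== SOURCE B (Python) =====
-- import re
--
-- _CODE2 = re.compile(r'[a-z]{2}')
--
-- def check_code_2(cd):
--   if not isinstance(cd, str):
--     return False
--   return _CODE2.fullmatch(cd) is not None
-- ===== Notes on version B (the rewrite author's own statement) =====
-- stated objective: idiomatic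
-- what changed: Replaces the explicit length check and per-character ord() range loop with a single compiled-regex fullmatch of [a-z]{2} coerced to bool.
import Mathlib
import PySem

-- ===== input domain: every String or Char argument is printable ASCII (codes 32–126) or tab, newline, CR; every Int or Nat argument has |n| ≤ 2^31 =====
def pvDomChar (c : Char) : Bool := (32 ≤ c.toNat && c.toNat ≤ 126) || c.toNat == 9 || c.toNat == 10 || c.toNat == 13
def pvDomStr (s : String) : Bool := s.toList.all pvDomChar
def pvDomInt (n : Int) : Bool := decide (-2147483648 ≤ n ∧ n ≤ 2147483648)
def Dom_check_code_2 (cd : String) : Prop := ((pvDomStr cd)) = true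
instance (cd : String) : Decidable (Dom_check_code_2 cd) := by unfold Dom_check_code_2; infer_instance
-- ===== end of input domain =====

-- B replaces A's length check plus per-character ord() range loop by a single
-- regex fullmatch of [a-z]{2} (idiomatic; same cost).

-- ===== PORT A =====
-- the 'for c in cd' loop with early return False
def check_code_2_loop : List Char → Bool
  | [] => true
  | c :: rest =>
    if c.toNat < 97 ∨ c.toNat > 122 then false
    else check_code_2_loop rest

def check_code_2 (cd : String) : Bool :=
  if (PySem.Str.len cd : Int) ≠ 2 then false
  else check_code_2_loop cd.toList

-- ===== PORT B =====
-- fullmatch of the pattern [a-z]{2}: exactly two characters, each in a..z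
def check_code_2_alt (cd : String) : Bool :=
  match cd.toList with
  | [c1, c2] => ('a' ≤ c1 && c1 ≤ 'z') && ('a' ≤ c2 && c2 ≤ 'z')
  | _ => false

-- ===== PRECONDITION & SPEC =====
def Spec_check_code_2 (cd : String) (out : Bool) : Prop := out = check_code_2_alt cd
instance (cd : String) (out : Bool) : Decidable (Spec_check_code_2 cd out) := by unfold Spec_check_code_2; infer_instance

-- ===== CLAIM (what is proved, stated in full; the proofs are below) =====
def Claim_equal_check_code_2 : Prop := ∀ (cd : String), Dom_check_code_2 cd → Spec_check_code_2 cd (check_code_2 cd)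

-- ===== LEMMAS AND PROOFS =====
theorem char_ge_a (c : Char) : ('a' ≤ c) ↔ 97 ≤ c.toNat := ⟨fun h => h, fun h => h⟩
theorem char_le_z (c : Char) : (c ≤ 'z') ↔ c.toNat ≤ 122 := ⟨fun h => h, fun h => h⟩

theorem check_code_2_eq (cd : String) : check_code_2 cd = check_code_2_alt cd := by
  unfold check_code_2 check_code_2_alt
  rw [PySem.Str.len_eq]
  rcases hcd : cd.toList with _ | ⟨c1, _ | ⟨c2, _ | ⟨c3, rest⟩⟩⟩
  · simp
  · simp
  · have h2 : ¬((([c1, c2] : List Char).length : Int) ≠ 2) := by simp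
    simp only [h2, if_false, check_code_2_loop]
    rw [show decide ('a' ≤ c1) = decide (97 ≤ c1.toNat) from decide_eq_decide.mpr (char_ge_a c1),
        show decide (c1 ≤ 'z') = decide (c1.toNat ≤ 122) from decide_eq_decide.mpr (char_le_z c1),
        show decide ('a' ≤ c2) = decide (97 ≤ c2.toNat) from decide_eq_decide.mpr (char_ge_a c2),
        show decide (c2 ≤ 'z') = decide (c2.toNat ≤ 122) from decide_eq_decide.mpr (char_le_z c2)]
    split_ifs with g1 g2 <;> [skip; skip; skip] <;>
      simp_all <;> omega
  · have h2 : ((((c1 :: c2 :: c3 :: rest) : List Char).length : Int) ≠ 2) := by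
      push_cast [List.length_cons]; omega
    rw [if_pos h2]

-- ===== VERDICT (by name: the statement is the Claim_ definition above) =====
theorem check_code_2_spec : Claim_equal_check_code_2 := by
  intro cd _
  unfold Spec_check_code_2
  exact check_code_2_eq cd
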